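-- pv_equiv track=rewrite | github.com/dhK98/study_algorithm | programmers/two-pointer/보석 쇼핑.py | solution
-- ===== SOURCE A (Python) =====
-- def solution(gems):
--     kind = len(set(gems))
--     size = len(gems)
--     answer = [0, size - 1]
--
--     dic = {gems[0]:1}
--     start = end = 0
--
--     while end < size:
--         if len(dic) < kind:
--             end += 1
--             if end == size: break
--             dic[gems[end]] = dic.get(gems[end],0) + 1
--         else:
--             if (end - start + 1) < (answer[1] - answer[0] + 1): answer = [start,end]
--             if dic[gems[start]] == 1: del dic[gems[start]]
--             else: dic[gems[start]] -= 1
--             start += 1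
--     answer[0] += 1
--     answer[1] += 1
--     return answer
-- ===== SOURCE B (Python) =====
-- def solution(gems):
--     kinds = set(gems)
--     k = len(kinds)
--     n = len(gems)
--     # try window lengths from the smallest possible upward; for each length,
--     # scan starts left to right and return the first window holding every kind
--     for L in range(k, n + 1):
--         for s in range(n - L + 1):
--             window = gems[s:s + L]
--             if all(g in window for g in kinds):
--                 return [s + 1, s + L]
-- ===== Notes on version B (the rewrite author's own statement) =====
-- stated objective: alternative
-- what changed: Replaced the adaptive two-pointer sweep with a shrink/grow counter dict by a brute search over the answer: for each candidate window length from the number of kinds upward, scan windows left to right and return the first one containing every kind (slower, but a direct expression of the spec).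
-- outside the precondition, e.g. on solution([]): A raises IndexError, B returns [1, 0]
import Mathlib
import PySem

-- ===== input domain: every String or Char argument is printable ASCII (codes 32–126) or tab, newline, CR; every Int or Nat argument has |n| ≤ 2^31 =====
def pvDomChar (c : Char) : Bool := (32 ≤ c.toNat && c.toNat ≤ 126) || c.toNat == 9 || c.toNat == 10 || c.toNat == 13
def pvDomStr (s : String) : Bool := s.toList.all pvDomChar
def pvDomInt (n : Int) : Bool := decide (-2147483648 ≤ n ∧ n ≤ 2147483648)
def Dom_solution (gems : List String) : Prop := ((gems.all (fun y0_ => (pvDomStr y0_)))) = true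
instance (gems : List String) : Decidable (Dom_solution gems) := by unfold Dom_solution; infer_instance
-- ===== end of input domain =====

-- B searches window lengths upward instead of A's two-pointer sweep; equivalence of the
-- return values is proved for nonempty input (A raises IndexError on []).

-- ===== PORT A =====
-- the while loop of A; indices start/end are Nat (they are only ever incremented from 0,
-- so Python's int arithmetic on them agrees); fuel is a totality guard only (each
-- iteration increments start or end, both bounded by n, so 2*n+2 fuel always suffices)
def solLoop (gems : List String) (kind n : Nat) : Nat → PySem.Dict String Int → Nat → Nat → Nat × Nat → Nat × Nat
  | 0, _, _, _, answer => answer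
  | fuel + 1, dic, start, end_, answer =>
    if end_ < n then
      if dic.size < kind then
        let end' := end_ + 1
        if end' = n then answer
        else
          let x := gems.getD end' ""          -- gems[end'], in range since end' < n
          solLoop gems kind n fuel (dic.insert x (dic.getD x 0 + 1)) start end' answer
      else
        let answer' := if end_ + 1 - start < answer.2 + 1 - answer.1 then (start, end_) else answer
        let y := gems.getD start ""           -- gems[start], in range on reachable states
        let dic' := if dic.getD y 0 = 1 then dic.erase y else dic.insert y (dic.getD y 0 - 1)
        solLoop gems kind n fuel dic' (start + 1) end_ answer'
    else answer

def solution (gems : List String) : List Int :=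
  let kind := (PySem.Set.ofList gems).length
  let size := gems.length
  let dic := (PySem.Dict.empty : PySem.Dict String Int).insert gems.headI 1   -- {gems[0]: 1}
  let answer := solLoop gems kind size (2 * size + 2) dic 0 0 (0, size - 1)
  [(answer.1 : Int) + 1, (answer.2 : Int) + 1]

-- ===== PORT B =====
-- inner loop: first start s in range(n-L+1) whose window gems[s:s+L] contains every kind
-- (the slice gems[s:s+L] is (gems.drop s).take L exactly, since 0 ≤ s and 0 ≤ L here)
def findStart (gems kinds : List String) (n L : Nat) : Option Nat :=
  (List.range (n - L + 1)).find? (fun s => kinds.all (fun g => decide (g ∈ (gems.drop s).take L)))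

-- outer loop over L in range(k, n+1), returning at the first hit; [] stands for Python's None
def solution_alt (gems : List String) : List Int :=
  let kinds : PySem.Set String := PySem.Set.ofList gems
  let k := kinds.length
  let n := gems.length
  ((List.range' k (n + 1 - k)).findSome? (fun L =>
      (findStart gems kinds n L).map (fun s => [(s : Int) + 1, (s : Int) + (L : Int)]))).getD []

-- ===== PRECONDITION & SPEC =====
-- Pre_ excludes only the empty list, on which A raises IndexError at gems[0]
def Pre_solution (gems : List String) : Prop := gems ≠ []
instance (gems : List String) : Decidable (Pre_solution gems) := by unfold Pre_solution; infer_instance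
def pvWitness_solution : List String := ["a", "b", "a"]

def Spec_solution (gems : List String) (out : List Int) : Prop := out = solution_alt gems
instance (gems : List String) (out : List Int) : Decidable (Spec_solution gems out) := by unfold Spec_solution; infer_instance

-- ===== CLAIM (what is proved, stated in full; the proofs are below) =====
def Claim_equal_solution : Prop := ∀ (gems : List String), Dom_solution gems → Pre_solution gems → Spec_solution gems (solution gems)

-- ===== LEMMAS AND PROOFS =====

-- window gems[s:s+L]
def win (gems : List String) (s L : Nat) : List String := (gems.drop s).take L

-- the window contains every kind of gem
def feasW (gems : List String) (s L : Nat) : Prop := ∀ g ∈ gems, g ∈ win gems s L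

def feasB (gems : List String) (s L : Nat) : Bool := gems.all (fun g => decide (g ∈ win gems s L))

lemma feasB_iff (gems : List String) (s L : Nat) : feasB gems s L = true ↔ feasW gems s L := by
  simp [feasB, feasW]

lemma win_subset (gems : List String) (s L : Nat) : win gems s L ⊆ gems :=
  fun _ h => List.drop_subset s gems (List.take_subset _ _ h)

lemma win_full (gems : List String) : win gems 0 gems.length = gems := by
  simp [win]

lemma win_mono (gems : List String) {s L s' L' : Nat} (h1 : s' ≤ s) (h2 : s + L ≤ s' + L') :
    win gems s L ⊆ win gems s' L' := by
  have he : win gems s L = ((win gems s' L').drop (s - s')).take L := by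
    unfold win
    rw [List.drop_take, List.drop_drop]
    have h3 : s' + (s - s') = s := by omega
    rw [h3, List.take_take]
    have h4 : min L (L' - (s - s')) = L := by omega
    rw [h4]
  rw [he]
  exact fun x hx => List.drop_subset _ _ (List.take_subset _ _ hx)

lemma feas_mono (gems : List String) {s L s' L' : Nat} (h1 : s' ≤ s) (h2 : s + L ≤ s' + L') :
    feasW gems s L → feasW gems s' L' :=
  fun h g hg => win_mono gems h1 h2 (h g hg)

lemma feas_zero (gems : List String) (hne : gems ≠ []) (s : Nat) : ¬ feasW gems s 0 := by
  intro h
  rcases List.exists_mem_of_ne_nil gems hne with ⟨g, hg⟩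
  have := h g hg
  simp [win] at this

lemma win_snoc (gems : List String) {s L : Nat} (h : s + L < gems.length) :
    win gems s (L + 1) = win gems s L ++ [gems.getD (s + L) ""] := by
  unfold win
  rw [List.take_add_one]
  congr 1
  have hL : L < (gems.drop s).length := by simp; omega
  rw [List.getElem?_drop]
  rw [List.getElem?_eq_getElem h, List.getD_eq_getElem gems "" h]
  rfl

lemma win_cons (gems : List String) {s : Nat} (L : Nat) (h : s < gems.length) :
    win gems s (L + 1) = gems.getD s "" :: win gems (s + 1) L := by
  unfold win
  rw [List.drop_eq_getElem_cons h, List.getD_eq_getElem gems "" h, List.take_succ_cons]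

-- cardinality: number of kinds
lemma ofList_length_eq_card (l : List String) :
    (PySem.Set.ofList l).length = l.toFinset.card := by
  have hnd : (PySem.Set.ofList l).Nodup := PySem.Set.nodup_ofList l
  have : (PySem.Set.ofList l).toFinset = l.toFinset := by
    ext g; simp [PySem.Set.mem_ofList]
  rw [← List.toFinset_card_of_nodup hnd, this]

lemma feas_iff_card (gems w : List String) (hw : w ⊆ gems) :
    (∀ g ∈ gems, g ∈ w) ↔ gems.toFinset.card ≤ w.toFinset.card := by
  constructor
  · intro h
    apply Finset.card_le_card
    intro g hg
    simp only [List.mem_toFinset] at *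
    exact h g hg
  · intro h g hg
    have hsub : w.toFinset ⊆ gems.toFinset := by
      intro x hx; simp only [List.mem_toFinset] at *; exact hw hx
    have := Finset.eq_of_subset_of_card_le hsub h
    rw [← List.mem_toFinset, ← this, List.mem_toFinset] at hg
    exact hg

lemma not_feas_iff_card (gems : List String) (s L : Nat) :
    ¬ feasW gems s L ↔ (win gems s L).toFinset.card < gems.toFinset.card := by
  rw [feasW, feas_iff_card gems _ (win_subset gems s L)]
  omega

-- ===== the dict invariant of A's loop =====
def DInv (dic : PySem.Dict String Int) (w : List String) : Prop :=
  (∀ g : String, dic.get? g = if w.count g = 0 then none else some ((w.count g : Int))) ∧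
    dic.keys.Nodup

lemma dinv_getD (dic : PySem.Dict String Int) (w : List String) (h : DInv dic w) (g : String) :
    dic.getD g 0 = (w.count g : Int) := by
  rcases h with ⟨h1, -⟩
  rw [PySem.Dict.getD_eq_get?_getD, h1 g]
  split <;> simp_all

lemma dinv_size (dic : PySem.Dict String Int) (w : List String) (h : DInv dic w) :
    dic.size = w.toFinset.card := by
  rcases h with ⟨h1, h2⟩
  have hk : dic.keys.toFinset = w.toFinset := by
    ext g
    simp only [List.mem_toFinset]
    rw [← not_iff_not, ← PySem.Dict.get?_eq_none_iff_not_mem_keys, h1 g, ← List.count_eq_zero]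
    split <;> simp_all
  have : dic.size = dic.keys.length := by
    simp [PySem.Dict.size, PySem.Dict.keys]
  rw [this, ← List.toFinset_card_of_nodup h2, hk]

lemma dinv_insert_right (dic : PySem.Dict String Int) (w : List String) (h : DInv dic w)
    (x : String) : DInv (dic.insert x (dic.getD x 0 + 1)) (w ++ [x]) := by
  obtain ⟨h1, h2⟩ := h
  constructor
  · intro g
    rw [PySem.Dict.get?_insert, dinv_getD dic w ⟨h1, h2⟩ x]
    by_cases hg : g = x
    · subst hg
      simp [List.count_append]
    · rw [if_neg hg, h1 g, List.count_append]
      have hz : [x].count g = 0 := List.count_eq_zero.mpr (by simp [hg])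
      rw [hz, Nat.add_zero]
  · apply PySem.Dict.nodup_keys_insert
    exact h2

-- get? after erase: the erased key is gone, others unchanged
lemma get?_erase_self (d : PySem.Dict String Int) (k : String) : (d.erase k).get? k = none := by
  simp only [PySem.Dict.erase, PySem.Dict.get?]
  rw [List.find?_eq_none.mpr]
  · rfl
  · intro p hp
    have := List.of_mem_filter hp
    simp_all

lemma find?_filter_of_imp {α : Type} (l : List α) (p q : α → Bool) (h : ∀ x, p x = true → q x = true) :
    (l.filter q).find? p = l.find? p := by
  induction l with
  | nil => rfl
  | cons a t ih =>
    by_cases hp : p a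
    · have hq := h a hp
      simp [hq, hp]
    · by_cases hq : q a <;> simp [hq, hp, ih]

lemma get?_erase_of_ne (d : PySem.Dict String Int) (k g : String) (hg : g ≠ k) :
    (d.erase k).get? g = d.get? g := by
  simp only [PySem.Dict.erase, PySem.Dict.get?]
  congr 1
  apply find?_filter_of_imp
  intro x hx
  have hx1 : x.1 = g := by simpa using hx
  simp [hx1, hg]

lemma nodup_keys_erase (d : PySem.Dict String Int) (k : String) (h : d.keys.Nodup) :
    (d.erase k).keys.Nodup := by
  simp only [PySem.Dict.erase, PySem.Dict.keys] at *
  exact h.sublist (List.filter_sublist.map _)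

lemma dinv_shrink (dic : PySem.Dict String Int) (y : String) (t : List String)
    (h : DInv dic (y :: t)) :
    DInv (if dic.getD y 0 = 1 then dic.erase y else dic.insert y (dic.getD y 0 - 1)) t := by
  obtain ⟨h1, h2⟩ := h
  have hy : dic.getD y 0 = ((y :: t).count y : Nat) := dinv_getD dic _ ⟨h1, h2⟩ y
  rw [List.count_cons_self] at hy
  by_cases hc : t.count y = 0
  · rw [if_pos (by rw [hy, hc]; rfl)]
    refine ⟨?_, nodup_keys_erase dic y h2⟩
    intro g
    by_cases hg : g = y
    · subst hg
      rw [get?_erase_self, if_pos hc]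
    · rw [get?_erase_of_ne dic y g hg, h1 g]
      have hg' : ¬ y = g := fun h => hg h.symm
      simp [hg']
  · rw [if_neg (by rw [hy]; omega)]
    refine ⟨?_, by apply PySem.Dict.nodup_keys_insert; exact h2⟩
    intro g
    rw [PySem.Dict.get?_insert]
    by_cases hg : g = y
    · subst hg
      rw [if_pos rfl, if_neg hc, hy]
      congr 1
      omega
    · rw [if_neg hg, h1 g]
      have hg' : ¬ y = g := fun h => hg h.symm
      simp [hg']

-- ===== the optimum: minimal feasible window length, then leftmost start =====
def okLen (gems : List String) (L : Nat) : Bool :=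
  (List.range (gems.length + 1)).any (fun s => decide (s + L ≤ gems.length) && feasB gems s L)

lemma okLen_iff (gems : List String) (L : Nat) :
    okLen gems L = true ↔ ∃ s, s + L ≤ gems.length ∧ feasW gems s L := by
  simp only [okLen, List.any_eq_true, List.mem_range, Bool.and_eq_true, decide_eq_true_eq,
    feasB_iff]
  constructor
  · rintro ⟨s, -, hs, hf⟩; exact ⟨s, hs, hf⟩
  · rintro ⟨s, hs, hf⟩; exact ⟨s, by omega, hs, hf⟩

lemma exists_okLen (gems : List String) : ∃ L, okLen gems L = true := by
  refine ⟨gems.length, (okLen_iff gems _).mpr ⟨0, by omega, ?_⟩⟩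
  rw [feasW, win_full]
  exact fun g hg => hg

def Lstar (gems : List String) : Nat := Nat.find (exists_okLen gems)

def okStart (gems : List String) (s : Nat) : Bool :=
  decide (s + Lstar gems ≤ gems.length) && feasB gems s (Lstar gems)

lemma okStart_iff (gems : List String) (s : Nat) :
    okStart gems s = true ↔ s + Lstar gems ≤ gems.length ∧ feasW gems s (Lstar gems) := by
  simp [okStart, feasB_iff]

lemma exists_okStart (gems : List String) : ∃ s, okStart gems s = true := by
  have := Nat.find_spec (exists_okLen gems)
  rw [okLen_iff] at this
  obtain ⟨s, hs, hf⟩ := this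
  exact ⟨s, (okStart_iff gems s).mpr ⟨hs, hf⟩⟩

def sstar (gems : List String) : Nat := Nat.find (exists_okStart gems)

lemma sstar_spec (gems : List String) :
    sstar gems + Lstar gems ≤ gems.length ∧ feasW gems (sstar gems) (Lstar gems) :=
  (okStart_iff gems _).mp (Nat.find_spec (exists_okStart gems))

lemma Lstar_min (gems : List String) {s L : Nat} (hs : s + L ≤ gems.length)
    (hf : feasW gems s L) : Lstar gems ≤ L :=
  Nat.find_min' (exists_okLen gems) ((okLen_iff gems L).mpr ⟨s, hs, hf⟩)

lemma sstar_min (gems : List String) {s : Nat} (hs : s < sstar gems) :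
    ¬ (s + Lstar gems ≤ gems.length ∧ feasW gems s (Lstar gems)) := by
  have := Nat.find_min (exists_okStart gems) hs
  rw [okStart_iff] at this
  exact this

lemma Lstar_pos (gems : List String) (hne : gems ≠ []) : 1 ≤ Lstar gems := by
  by_contra h
  have h0 : Lstar gems = 0 := by omega
  have := (sstar_spec gems).2
  rw [h0] at this
  exact feas_zero gems hne _ this

lemma Lstar_le (gems : List String) : Lstar gems ≤ gems.length := by
  have := Nat.find_min' (exists_okLen gems) ((okLen_iff gems gems.length).mpr
    ⟨0, by omega, by rw [feasW, win_full]; exact fun g hg => hg⟩)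
  exact this

lemma Lstar_strict (gems : List String) {s L : Nat} (hs : s < sstar gems)
    (hL : s + L ≤ gems.length) (hf : feasW gems s L) : Lstar gems < L := by
  rcases Nat.lt_or_ge (Lstar gems) L with h | h
  · exact h
  · have heq : L = Lstar gems := le_antisymm h (Lstar_min gems hL hf)
    subst heq
    exact absurd ⟨hL, hf⟩ (sstar_min gems hs)

lemma Lstar_ge_kinds (gems : List String) :
    gems.toFinset.card ≤ Lstar gems := by
  have hf := (sstar_spec gems).2
  have h1 : gems.toFinset.card ≤ (win gems (sstar gems) (Lstar gems)).toFinset.card :=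
    (feas_iff_card gems _ (win_subset gems _ _)).mp hf
  calc gems.toFinset.card ≤ (win gems (sstar gems) (Lstar gems)).toFinset.card := h1
    _ ≤ (win gems (sstar gems) (Lstar gems)).length := List.toFinset_card_le _
    _ ≤ Lstar gems := by simp [win]

-- ===== A's loop computes (sstar, sstar + Lstar - 1) =====
lemma loop_eq (gems : List String) (hne : gems ≠ []) :
    ∀ (fuel s e : Nat) (dic : PySem.Dict String Int) (ans : Nat × Nat),
    2 * gems.length - (s + e) ≤ fuel →
    s ≤ e + 1 → e < gems.length →
    DInv dic (win gems s (e + 1 - s)) →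
    (∀ L', s + L' ≤ e → ¬ feasW gems s L') →
    (ans = (sstar gems, sstar gems + Lstar gems - 1) ∨
      (s ≤ sstar gems ∧ Lstar gems < ans.2 + 1 - ans.1)) →
    solLoop gems ((PySem.Set.ofList gems).length) gems.length fuel dic s e ans
      = (sstar gems, sstar gems + Lstar gems - 1) := by
  intro fuel
  induction fuel with
  | zero =>
    intro s e dic ans hfuel hse hen hdic hmin hans
    omega
  | succ fuel ih =>
    intro s e dic ans hfuel hse hen hdic hmin hans
    have hLpos := Lstar_pos gems hne
    have hLle := Lstar_le gems
    have hss := sstar_spec gems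
    have hsize : dic.size = (win gems s (e + 1 - s)).toFinset.card := dinv_size _ _ hdic
    have hkind : (PySem.Set.ofList gems).length = gems.toFinset.card := ofList_length_eq_card gems
    simp only [solLoop]
    rw [if_pos hen]
    by_cases hfeas : feasW gems s (e + 1 - s)
    · -- all kinds are in the current window: A shrinks from the left
      have hguard : ¬ dic.size < (PySem.Set.ofList gems).length := by
        rw [hsize, hkind]
        intro hlt
        exact (not_feas_iff_card gems s (e + 1 - s)).mpr hlt hfeas
      rw [if_neg hguard]
      have hsle : s ≤ e := by
        by_contra hgt
        have h0 : e + 1 - s = 0 := by omega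
        rw [h0] at hfeas
        exact feas_zero gems hne s hfeas
      have hLlen : Lstar gems ≤ e + 1 - s := Lstar_min gems (by omega) hfeas
      have hwin : win gems s (e + 1 - s) = gems.getD s "" :: win gems (s + 1) (e - s) := by
        have h1 : e + 1 - s = (e - s) + 1 := by omega
        rw [h1, win_cons gems (e - s) (by omega)]
      refine ih (s + 1) e _ _ (by omega) (by omega) hen ?_ ?_ ?_
      · rw [hwin] at hdic
        have h2 := dinv_shrink dic _ _ hdic
        have h3 : e + 1 - (s + 1) = e - s := by omega
        rw [h3]
        exact h2
      · intro L' hL' hf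
        exact hmin (L' + 1) (by omega) (feas_mono gems (by omega) (by omega) hf)
      · -- the answer invariant is preserved by the (possibly updated) answer
        rcases hans with h | ⟨hs2, hlen⟩
        · rw [h]
          rw [if_neg (by omega)]
          left
          rfl
        · by_cases hseq : s = sstar gems
          · -- this is the leftmost shortest window: it is recorded now
            have hLeq : e + 1 - s = Lstar gems := by
              by_contra hne2
              have hlt : Lstar gems < e + 1 - s := by omega
              refine hmin (Lstar gems) (by omega) ?_
              rw [hseq]
              exact hss.2
            rw [if_pos (by omega)]
            left
            rw [hseq]
            have h4 : e = sstar gems + Lstar gems - 1 := by omega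
            rw [h4]
          · have hslt : s < sstar gems := by omega
            have hstrict : Lstar gems < e + 1 - s := Lstar_strict gems hslt (by omega) hfeas
            right
            refine ⟨by omega, ?_⟩
            split_ifs with hcond
            · simpa using hstrict
            · exact hlen
    · -- some kind is missing: A extends to the right
      have hguard : dic.size < (PySem.Set.ofList gems).length := by
        rw [hsize, hkind]
        exact (not_feas_iff_card gems s (e + 1 - s)).mp hfeas
      rw [if_pos hguard]
      by_cases hend : e + 1 = gems.length
      · rw [if_pos hend]
        rcases hans with h | ⟨hs2, hlen⟩
        · exact h
        · exfalso
          have hfs : feasW gems s (gems.length - s) :=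
            feas_mono gems hs2 (by omega) hss.2
          have h5 : e + 1 - s = gems.length - s := by omega
          rw [h5] at hfeas
          exact hfeas hfs
      · rw [if_neg hend]
        refine ih s (e + 1) _ _ (by omega) (by omega) (by omega) ?_ ?_ hans
        · have hsnoc : win gems s (e + 1 + 1 - s) = win gems s (e + 1 - s) ++ [gems.getD (e + 1) ""] := by
            have h6 : e + 1 + 1 - s = (e + 1 - s) + 1 := by omega
            have h7 : s + (e + 1 - s) = e + 1 := by omega
            rw [h6, win_snoc gems (by omega), h7]
          rw [hsnoc]
          exact dinv_insert_right dic _ hdic _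
        · intro L' hL' hf
          rcases Nat.lt_or_ge (s + L') (e + 1) with h | h
          · exact hmin L' (by omega) hf
          · have h8 : L' = e + 1 - s := by omega
            rw [h8] at hf
            exact hfeas hf

lemma solution_eq (gems : List String) (hne : gems ≠ []) :
    solution gems = [(sstar gems : Int) + 1, (sstar gems : Int) + (Lstar gems : Int)] := by
  have hn1 : 1 ≤ gems.length := List.length_pos_of_ne_nil hne
  have hLpos := Lstar_pos gems hne
  have hLle := Lstar_le gems
  have hss := sstar_spec gems
  have hrw : solution gems =
      [((solLoop gems ((PySem.Set.ofList gems).length) gems.length (2 * gems.length + 2)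
          ((PySem.Dict.empty : PySem.Dict String Int).insert gems.headI 1) 0 0
          (0, gems.length - 1)).1 : Int) + 1,
       ((solLoop gems ((PySem.Set.ofList gems).length) gems.length (2 * gems.length + 2)
          ((PySem.Dict.empty : PySem.Dict String Int).insert gems.headI 1) 0 0
          (0, gems.length - 1)).2 : Int) + 1] := rfl
  rw [hrw]
  rw [loop_eq gems hne (2 * gems.length + 2) 0 0 _ _ (by omega) (by omega) (by omega) ?_ ?_ ?_]
  · have h2 : ((sstar gems + Lstar gems - 1 : Nat) : Int) + 1
        = (sstar gems : Int) + (Lstar gems : Int) := by omega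
    rw [h2]
  · -- initial dict models the one-element window
    obtain ⟨g0, t, rfl⟩ : ∃ g0 t, gems = g0 :: t := by
      cases gems with
      | nil => exact absurd rfl hne
      | cons a b => exact ⟨a, b, rfl⟩
    constructor
    · intro g
      rw [PySem.Dict.get?_insert, PySem.Dict.get?_empty]
      have hw : win (g0 :: t) 0 (0 + 1 - 0) = [g0] := by simp [win]
      rw [hw]
      by_cases hg : g = g0
      · subst hg
        simp [List.headI]
      · have hg' : ¬ g0 = g := fun h => hg h.symm
        simp [List.headI, hg, hg']
    · apply PySem.Dict.nodup_keys_insert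
      exact PySem.Dict.nodup_keys_empty
  · intro L' hL' hf
    have h0 : L' = 0 := by omega
    rw [h0] at hf
    exact feas_zero gems hne 0 hf
  · by_cases hL : Lstar gems = gems.length
    · left
      have hs0 : sstar gems = 0 := by
        have := Nat.find_min' (exists_okStart gems) ((okStart_iff gems 0).mpr
          ⟨by omega, by rw [hL, feasW, win_full]; exact fun g hg => hg⟩)
        omega
      rw [hs0, hL, Nat.zero_add]
    · right
      exact ⟨Nat.zero_le _, by omega⟩

-- ===== B computes the same =====
lemma find?_range'_eq_some {p : Nat → Bool} :
    ∀ {a len j : Nat}, a ≤ j → j < a + len → p j = true →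
    (∀ i, a ≤ i → i < j → p i = false) →
    (List.range' a len).find? p = some j := by
  intro a len
  induction len generalizing a with
  | zero => intro j h1 h2; omega
  | succ m ih =>
    intro j h1 h2 hp hmin
    rw [List.range'_succ, List.find?_cons]
    rcases Nat.eq_or_lt_of_le h1 with heq | hlt
    · subst heq
      simp [hp]
    · rw [hmin a le_rfl hlt]
      exact ih (by omega) (by omega) hp (fun i hi1 hi2 => hmin i (by omega) hi2)

lemma findSome?_range'_eq_some {β : Type} {f : Nat → Option β} {b : β} :
    ∀ {a len j : Nat}, a ≤ j → j < a + len → f j = some b →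
    (∀ i, a ≤ i → i < j → f i = none) →
    (List.range' a len).findSome? f = some b := by
  intro a len
  induction len generalizing a with
  | zero => intro j h1 h2; omega
  | succ m ih =>
    intro j h1 h2 hf hmin
    rw [List.range'_succ, List.findSome?_cons]
    rcases Nat.eq_or_lt_of_le h1 with heq | hlt
    · subst heq
      rw [hf]
    · rw [hmin a le_rfl hlt]
      exact ih (by omega) (by omega) hf (fun i hi1 hi2 => hmin i (by omega) hi2)

lemma all_kinds_iff (gems : List String) (p : String → Bool) :
    ((PySem.Set.ofList gems).all p = true) ↔ ∀ g ∈ gems, p g = true := by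
  simp [List.all_eq_true, PySem.Set.mem_ofList]

lemma alt_eq (gems : List String) (hne : gems ≠ []) :
    solution_alt gems = [(sstar gems : Int) + 1, (sstar gems : Int) + (Lstar gems : Int)] := by
  have hn1 : 1 ≤ gems.length := List.length_pos_of_ne_nil hne
  have hLpos := Lstar_pos gems hne
  have hLle := Lstar_le gems
  have hk : (PySem.Set.ofList gems).length = gems.toFinset.card := ofList_length_eq_card gems
  have hkL : (PySem.Set.ofList gems).length ≤ Lstar gems := by
    rw [hk]; exact Lstar_ge_kinds gems
  have hss := sstar_spec gems
  have hrw : solution_alt gems =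
      ((List.range' ((PySem.Set.ofList gems).length)
          (gems.length + 1 - (PySem.Set.ofList gems).length)).findSome?
        (fun L => ((List.range (gems.length - L + 1)).find?
            (fun s => (PySem.Set.ofList gems).all (fun g => decide (g ∈ (gems.drop s).take L)))).map
          (fun s => [(s : Int) + 1, (s : Int) + (L : Int)]))).getD [] := rfl
  rw [hrw]
  rw [findSome?_range'_eq_some (j := Lstar gems) hkL (by omega) ?_ ?_]
  · rfl
  · -- at L = Lstar the inner scan finds sstar
    rw [List.range_eq_range',
      find?_range'_eq_some (j := sstar gems) (Nat.zero_le _) (by omega) ?_ ?_]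
    · rfl
    · rw [all_kinds_iff]
      intro g hg
      exact decide_eq_true (hss.2 g hg)
    · intro i _ hi
      rw [← Bool.not_eq_true]
      rw [all_kinds_iff]
      intro hall
      have hf : feasW gems i (Lstar gems) := by
        intro g hg
        have := hall g hg
        exact of_decide_eq_true this
      exact sstar_min gems hi ⟨by omega, hf⟩
  · -- every shorter length has no feasible window
    intro L hL1 hL2
    have hnone : (List.range (gems.length - L + 1)).find?
        (fun s => (PySem.Set.ofList gems).all (fun g => decide (g ∈ (gems.drop s).take L)))
        = none := by
      rw [List.find?_eq_none]
      intro s hs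
      rw [List.mem_range] at hs
      intro hall
      rw [all_kinds_iff] at hall
      have hf : feasW gems s L := fun g hg => of_decide_eq_true (hall g hg)
      have := Lstar_min gems (show s + L ≤ gems.length by omega) hf
      omega
    rw [hnone]
    rfl


-- ===== VERDICT (by name: the statement is the Claim_ definition above) =====
theorem solution_spec : Claim_equal_solution := by
  intro gems _ hpre
  unfold Spec_solution
  rw [solution_eq gems hpre, alt_eq gems hpre]
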